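/- GENERATED by mk_final_copies.py from the proof of the farm's unit `start_decoder.C1` (farm:start_decoder.C1.1: Proof.lean) as the
   re-elaboration sweep compiled it — do not edit. -/
import Asan.CheckWalk
import Vorbis.Spec.Units.start_decoder_C1
open X86 X86.User Asan Vorbis Vorbis.Spec Vorbis.Spec.StartDecoder

set_option maxRecDepth 4000
set_option maxHeartbeats 4000000

namespace Vorbis.Spec.start_decoder_C1

/-- The two spill slots segment `C1` writes: qword `[R + 18H]` (f) and dword `[R + 30H]` (i). -/
def spills (g : Ghost) : List Span := [⟨g.R + 0x18, g.R + 0x20⟩, ⟨g.R + 0x30, g.R + 0x34⟩]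

/-- **The point `SD4 0` over the two spills**: every allocated block (the arena's, `*f`, the fixed objects) lies off the two
slots of start_decoder's own frame, the shadow is untouched, the frame constants lie in other slots. -/
theorem sd4_carry {g : Ghost} {A : Arena × List Obj} {mem mem' : Mem}
    (hsd : Real.SD4 g.len 0 A (g.Blk A) (g.Live A) mem g.f g.R)
    (hall : AllKept (g.Blk A) mem mem')
    (hsh : Mem.EqOn 0xC00000 0xE00000 mem mem')
    (hconsts : SDFrameConsts 3 mem' g.R) :
    Real.SD4 g.len 0 A (g.Blk A) (g.Live A) mem' g.f g.R := by
  have hL := groups_laws g.len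
  have hob : g.Blk A (objBlock g.f) := hsd.bits.OB1
  have hk := hall _ hob
  have hid : ∀ B, g.Blk A B → g.Blk A B := fun _ h => h
  have he : ObjEq [(160, 176), (1749, 1750), (1784, 1788)] mem g.f mem' g.f := ObjEq.of_kept_obj hk (by decide)
  have ecbs : stb_vorbis.codebooks mem' g.f = stb_vorbis.codebooks mem g.f := by
    simp only [vacc, voff]
    exact he.u64 168 (by decide)
  have ecnt : stb_vorbis.codebook_count mem' g.f = stb_vorbis.codebook_count mem g.f := by
    simp only [vacc, voff]
    exact he.i32 160 (by decide)
  have hcb0 := hsd.cb0 (by omega)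
  have hnn : stb_vorbis.codebooks mem' g.f ≠ 0 := by
    rw [ecbs]
    exact hcb0.2
  refine
    { env := hsd.env.eqOn hsh
      frame := hconsts
      arena := ?arena
      setups := hsd.setups
      noTemps := hsd.noTemps
      bits := hL.bits.carries _ _ _ _ _ hall hid hob hsd.bits
      first := ?first
      discard0 := ?discard0
      header := fun h1 => hL.header.carries _ _ _ _ _ hall hid hob (hsd.header h1)
      commentZero := fun h1 => absurd h1 (by omega)
      comment := fun h2 => hL.comment.carries _ _ _ _ _ hall hid hob (hsd.comment h2)
      cb0 := fun _ => ⟨hL.cb0.carries _ _ _ _ _ hall hid hob hcb0.1, hnn⟩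
      codebooks := fun h5 => absurd h5 (by omega)
      floor := fun h6 => absurd h6 (by omega)
      lfl := fun h6 => absurd h6 (by omega)
      residue := fun h7 => absurd h7 (by omega)
      mapping := fun h8 => absurd h8 (by omega)
      mode := fun h9 => absurd h9 (by omega)
      buffers := fun h10 => absurd h10 (by omega)
      mdct := fun h11 => absurd h11 (by omega)
      temp := fun h12 => absurd h12 (by omega)
      rest := ?rest
      done := hsd.done.carry hL hall hid hob
      zf := ?zf }
  case arena =>
    -- AR5 reads four fields of `*f`, which is kept
    have ha : ArenaOK A.1 A.2 mem g.f := hsd.arena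
    exact ha.frame_obj hk.inside hk.same
  case first =>
    have e : stb_vorbis.first_decode mem' g.f = stb_vorbis.first_decode mem g.f := by
      simp only [vacc, voff]
      exact he.u8 1749 (by decide)
    rw [e]
    exact hsd.first
  case discard0 =>
    have e : stb_vorbis.discard_samples_deferred mem' g.f = stb_vorbis.discard_samples_deferred mem g.f := by
      simp only [vacc, voff]
      exact he.i32 1784 (by decide)
    rw [e]
    exact hsd.discard0
  case rest =>
    -- the zero rest of `*f`: bytes of the kept object
    have hr : RestZero mem g.f (restFrom 3) := hsd.rest
    have hs := hk.same
    have hin := hk.inside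
    simp only [vblock, voff] at hs hin
    unfold RestZero at hr ⊢
    apply hr.frame
    · apply Mem.EqOn.mono hs
      · omega
      · simp only [voff]
        omega
    · simp only [voff]
      omega
  case zf =>
    -- the codebooks block is an allocated block: kept
    have hz : ZF mem (stb_vorbis.codebooks mem g.f) (stb_vorbis.codebook_count mem g.f).toNat 0 := hsd.zf
    have hF2 := (CB0.ok hcb0.1 hcb0.2).F2
    have hkc := hall _ hF2
    have hs := hkc.same
    have hin := hkc.inside
    simp only [vblock] at hs hin
    show ZF mem' (stb_vorbis.codebooks mem' g.f) (stb_vorbis.codebook_count mem' g.f).toNat 0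
    rw [ecbs, ecnt]
    apply hz.same
    · apply Mem.EqOn.mono hs
      · omega
      · omega
    · omega
    · exact hin

/-- **Where `*f` is**: off the stack region, or above the return-address slot (a stack object of a caller's protected frame). -/
theorem obj_off {u₀ : State} {g : Ghost} {A : Arena × List Obj} {v : State} (hb : BodyC1 u₀ g A v) :
    g.f + 1808 ≤ 0x700000 ∨ g.RA + 8 ≤ g.f := by
  obtain ⟨o, ho, h1, h2⟩ := hb.hand.obj
  simp only [voff] at h2
  rcases List.mem_append.mp ho with hs | hoth
  · -- a stack object of a caller's frame
    right
    unfold stackObjs at hs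
    obtain ⟨bF, hbF, hin⟩ := List.mem_flatMap.mp hs
    obtain ⟨fo, _, e⟩ := FrameLayout.mem_objsAt hin
    have hc := hb.frame.callers bF hbF
    rw [e] at h1
    simp only [] at h1
    omega
  · -- a non-stack object
    have hoff := hb.frame.shadow.off o hoth
    have htop := hb.frame.ra.2.2
    unfold OffStack at hoff
    omega

/-- **Every allocated block is kept by the two spills**: a setup block of the arena and a fixed object lie off the stack region,
`*f` lies off it or above the return-address slot; the spills lie in `[R + 18H, R + 34H)`, below the return-address slot. -/
theorem allKept_spills {u₀ : State} {g : Ghost} {A : Arena × List Obj} {v : State} {mem' : Mem} (hb : BodyC1 u₀ g A v)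
    (hs : Mem.SameExcept (spills g) v.mem mem') : AllKept (g.Blk A) v.mem mem' := by
  have hobj := obj_off hb
  obtain ⟨hR, _⟩ := hb.frame.r_eq
  obtain ⟨_, hlo, hhi⟩ := hb.frame.ra
  have hlen := hb.sd.bits.remaining_le.2
  have ha : ArenaOK A.1 A.2 v.mem g.f := hb.sd.arena
  simp only [depth, steady] at hR hlo
  apply AllKept.of_sameExcept hb.sd.env.ok hs
  intro B hB w hw
  -- where the two windows are
  have hwin : 0x700000 ≤ w.lo ∧ w.hi ≤ g.RA := by
    simp only [spills, List.mem_cons, List.mem_nil_iff, or_false] at hw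
    rcases hw with rfl | rfl
    · simp only []
      omega
    · simp only []
      omega
  -- where the block is
  rcases hB with hset | hext
  · have := ha.blk_off_stack hset
    omega
  · rcases List.mem_cons.mp hext with rfl | hfix
    · simp only [vblock, voff]
      omega
    · have := fixed_off_stack g.len hlen B hfix
      omega

/-- **A read off the two spill slots** goes through the segment's stores. -/
theorem read_off {g : Ghost} {mem mem' : Mem} (hs : Mem.SameExcept (spills g) mem mem') (a k : Nat) (hk : a + k < 2 ^ 64)
    (hd : a + k ≤ g.R + 0x18 ∨ (g.R + 0x20 ≤ a ∧ a + k ≤ g.R + 0x30) ∨ g.R + 0x34 ≤ a) :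
    mem'.readLE (addr a) k = mem.readLE (addr a) k := by
  have e := toNat_addr a (by omega)
  apply hs.readLE (addr a) k (by omega)
  intro w hw
  simp only [spills, List.mem_cons, List.mem_nil_iff, or_false] at hw
  rcases hw with rfl | rfl
  · simp only []
    omega
  · simp only []
    omega

/-- **The frame constants over the two spills**: the shadow index `[R + 8]`, Z10 `[R + 10H]`, ONE20 `[R + 20H]`, Z24 `[R + 24H]` are
other slots. -/
theorem consts_spills {g : Ghost} {mem mem' : Mem} (h : SDFrameConsts 3 mem g.R) (hs : Mem.SameExcept (spills g) mem mem')
    (hR : g.R + 0x38 < 2 ^ 64) : SDFrameConsts 3 mem' g.R := by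
  obtain ⟨h1, h2, h3, h4, h5⟩ := h
  refine ⟨h1, ?_, ?_, ?_, ?_⟩
  · have e : mem'.u64 (g.R + 8) = mem.u64 (g.R + 8) := read_off hs (g.R + 8) 8 (by omega) (by omega)
    rw [e]
    exact h2
  · have e : mem'.u32 (g.R + 0x20) = mem.u32 (g.R + 0x20) := read_off hs (g.R + 0x20) 4 (by omega) (by omega)
    rw [e]
    exact h3
  · intro hk
    have e : mem'.u8 (g.R + 0x10) = mem.u8 (g.R + 0x10) := read_off hs (g.R + 0x10) 1 (by omega) (by omega)
    rw [e]
    exact h4 hk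
  · intro hk1 hk2
    have e : mem'.u32 (g.R + 0x24) = mem.u32 (g.R + 0x24) := read_off hs (g.R + 0x24) 4 (by omega) (by omega)
    rw [e]
    exact h5 hk1 hk2

/-- The spills lie in the stack region: the shadow is untouched. -/
theorem shadow_spills {u₀ : State} {g : Ghost} {A : Arena × List Obj} {v : State} {mem' : Mem} (hb : BodyC1 u₀ g A v)
    (hs : Mem.SameExcept (spills g) v.mem mem') : Mem.EqOn 0xC00000 0xE00000 v.mem mem' := by
  obtain ⟨hR, _⟩ := hb.frame.r_eq
  obtain ⟨_, hlo, hhi⟩ := hb.frame.ra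
  simp only [depth, steady] at hR hlo
  apply hs.eqOn
  intro w hw
  simp only [spills, List.mem_cons, List.mem_nil_iff, or_false] at hw
  rcases hw with rfl | rfl
  · simp only []
    omega
  · simp only []
    omega

/-- **The invariant side of the exit**: `SD4 0` and the record with the ages over the two spills; the head-of-iteration snapshot is
the arena of this point (`C1` allocates nothing). -/
theorem inv_spills {u₀ : State} {g : Ghost} {A : Arena × List Obj} {v : State} {mem' : Mem} (hb : BodyC1 u₀ g A v)
    (hs : Mem.SameExcept (spills g) v.mem mem') :
    Real.SD4 g.len 0 A (g.Blk A) (g.Live A) mem' g.f g.R ∧ ∃ A2 A3 : Arena, BookTrans A2 A3 A.1 A.1 mem' g.f 0 := by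
  have hall := allKept_spills hb hs
  obtain ⟨hR, _⟩ := hb.frame.r_eq
  obtain ⟨_, hlo, hhi⟩ := hb.frame.ra
  simp only [depth, steady] at hR hlo
  refine ⟨sd4_carry hb.sd hall (shadow_spills hb hs) (consts_spills hb.sd.frame hs (by omega)), ?_⟩
  obtain ⟨A2, hages⟩ := hb.ages
  refine ⟨A2, A.1, hages.frame_old ?_ ?_⟩
  · exact ObjEq.of_kept_obj (hall _ hb.sd.bits.OB1) (by decide)
  · intro B hB
    exact hall B (up g A B hB)

/-- **The common part `Frame` at the exit `0x114298`**: rsp, the saved registers, the return address, the shadow index, the shadow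
layer, `log2_4` and the footprint since the entry over the two spills into the function's own frame. -/
theorem frame_spills {u₀ : State} {g : Ghost} {A : Arena × List Obj} {v w : State} (hb : BodyC1 u₀ g A v)
    (hrip : w.rip = pc_C2) (hrsp : w.reg .rsp = v.reg .rsp) (hcode : CodeOK u₀ w.mem) (hinv : abiInv w)
    (hs : Mem.SameExcept (spills g) v.mem w.mem) : Frame u₀ g pc_C2 A w := by
  have fr := hb.frame
  obtain ⟨hR, _⟩ := fr.r_eq
  obtain ⟨_, hlo, hhi⟩ := fr.ra
  simp only [depth, steady] at hR hlo
  have hrsp' : w.reg .rsp = addr g.R := by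
    rw [hrsp]
    exact fr.rsp
  refine
    { entry := fr.entry
      rip := hrip
      rsp := hrsp'
      shadowIdx := ?_
      saved_rbx := ?_
      saved_rbp := ?_
      saved_r12 := ?_
      saved_r13 := ?_
      saved_r14 := ?_
      saved_r15 := ?_
      saved_ra := ?_
      code := hcode
      inv := hinv
      shadow := fr.shadow.untouched (shadow_spills hb hs)
      offText := fr.offText
      ext := fr.ext
      callers := fr.callers
      sh7 := ?sh7
      same := ?same }
  · have e : w.mem.u64 (g.R + 8) = v.mem.u64 (g.R + 8) := read_off hs (g.R + 8) 8 (by omega) (by omega)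
    rw [e]
    exact fr.shadowIdx
  · have e : w.mem.u64 (g.R + 0x598) = v.mem.u64 (g.R + 0x598) := read_off hs (g.R + 0x598) 8 (by omega) (by omega)
    rw [e]
    exact fr.saved_rbx
  · have e : w.mem.u64 (g.R + 0x5a0) = v.mem.u64 (g.R + 0x5a0) := read_off hs (g.R + 0x5a0) 8 (by omega) (by omega)
    rw [e]
    exact fr.saved_rbp
  · have e : w.mem.u64 (g.R + 0x5a8) = v.mem.u64 (g.R + 0x5a8) := read_off hs (g.R + 0x5a8) 8 (by omega) (by omega)
    rw [e]
    exact fr.saved_r12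
  · have e : w.mem.u64 (g.R + 0x5b0) = v.mem.u64 (g.R + 0x5b0) := read_off hs (g.R + 0x5b0) 8 (by omega) (by omega)
    rw [e]
    exact fr.saved_r13
  · have e : w.mem.u64 (g.R + 0x5b8) = v.mem.u64 (g.R + 0x5b8) := read_off hs (g.R + 0x5b8) 8 (by omega) (by omega)
    rw [e]
    exact fr.saved_r14
  · have e : w.mem.u64 (g.R + 0x5c0) = v.mem.u64 (g.R + 0x5c0) := read_off hs (g.R + 0x5c0) 8 (by omega) (by omega)
    rw [e]
    exact fr.saved_r15
  · have e : w.mem.u64 (g.R + 0x5c8) = v.mem.u64 (g.R + 0x5c8) := read_off hs (g.R + 0x5c8) 8 (by omega) (by omega)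
    rw [e]
    exact fr.saved_ra
  case sh7 =>
    -- the global `log2_4` lies in the image, far below the stack
    intro i hi
    have e := read_off hs (Vorbis.Globals.log2_4.beg + i) 1 (by simp only [Vorbis.Globals.log2_4]; omega)
      (by simp only [Vorbis.Globals.log2_4]; omega)
    unfold addr at e
    rw [e]
    exact fr.sh7 i hi
  case same =>
    -- the two spills lie in the stack window of the function's footprint
    apply fr.same.step_same hs
    intro s hsp a h1 h2
    refine ⟨⟨g.RA - depth, g.RA⟩, List.mem_cons_self, ?_, ?_⟩
    · simp only [spills, List.mem_cons, List.mem_nil_iff, or_false] at hsp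
      simp only [depth]
      rcases hsp with rfl | rfl
      · simp only [] at h1
        omega
      · simp only [] at h1
        omega
    · simp only [spills, List.mem_cons, List.mem_nil_iff, or_false] at hsp
      rcases hsp with rfl | rfl
      · simp only [] at h2 ⊢
        omega
      · simp only [] at h2 ⊢
        omega

/-- **The memory after the two spills** (`mov [rsp+30H], eax` with eax = 0, `mov [rsp+18H], rbp` with rbp = f): it differs from
the memory before in the two slots only, qword `[R + 18H]` reads `f` and dword `[R + 30H]` reads 0. -/
theorem mem_spills (g : Ghost) (mem : Mem) (hR : g.R + 0x38 < 2 ^ 64) (hf : g.f < 2 ^ 64) :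
    Mem.SameExcept (spills g) mem ((mem.writeLE (addr (g.R + 0x30)) 4 0).writeLE (addr (g.R + 0x18)) 8 (addr g.f).toNat) ∧
      ((mem.writeLE (addr (g.R + 0x30)) 4 0).writeLE (addr (g.R + 0x18)) 8 (addr g.f).toNat).u64 (g.R + 0x18) = g.f ∧
      ((mem.writeLE (addr (g.R + 0x30)) 4 0).writeLE (addr (g.R + 0x18)) 8 (addr g.f).toNat).u32 (g.R + 0x30) = 0 := by
  have e18 := toNat_addr (g.R + 0x18) (by omega)
  have e30 := toNat_addr (g.R + 0x30) (by omega)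
  refine ⟨?_, ?_, ?_⟩
  · apply Mem.SameExcept.step_writeLE
    · apply Mem.SameExcept.writeLE
      · omega
      · refine ⟨⟨g.R + 0x30, g.R + 0x34⟩, ?_, ?_, ?_⟩
        · simp only [spills, List.mem_cons, List.mem_nil_iff, or_false, or_true]
        · simp only []
          omega
        · simp only []
          omega
    · omega
    · refine ⟨⟨g.R + 0x18, g.R + 0x20⟩, ?_, ?_, ?_⟩
      · simp only [spills, List.mem_cons, List.mem_nil_iff, or_false, true_or]
      · simp only []
        omega
      · simp only []
        omega
  · unfold Mem.u64
    rw [Mem.readLE_writeLE_same _ _ _ _ (by omega), toNat_addr g.f hf]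
    omega
  · unfold Mem.u32
    rw [Mem.readLE_writeLE_disjoint_noWrap _ _ _ _ _ _ ?_ ?_ (by omega), Mem.readLE_writeLE_same _ _ _ _ (by omega)]
    · unfold Mem.NoWrap
      omega
    · unfold Mem.NoWrap
      omega

/-- **The exit assertion `AtC2 0`** from the entry assertion's body, the machine facts of the exit state and its memory. -/
theorem exit_spills {u₀ : State} {g : Ghost} {A : Arena × List Obj} {v w : State} (hb : BodyC1 u₀ g A v)
    (hrip : w.rip = pc_C2) (hrsp : w.reg .rsp = v.reg .rsp) (hcode : CodeOK u₀ w.mem) (hinv : abiInv w)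
    (hmem : w.mem = (v.mem.writeLE (addr (g.R + 0x30)) 4 0).writeLE (addr (g.R + 0x18)) 8 (addr g.f).toNat) :
    AtC2 u₀ g 0 w := by
  obtain ⟨hR, _⟩ := hb.frame.r_eq
  obtain ⟨_, hlo, hhi⟩ := hb.frame.ra
  simp only [depth, steady] at hR hlo
  have hobr := hb.sd.bits.OBR
  obtain ⟨hs, hf, hi⟩ := mem_spills g v.mem (by omega) (by omega)
  rw [← hmem] at hs hf hi
  obtain ⟨hsd, hages⟩ := inv_spills hb hs
  exact ⟨A, frame_spills hb hrip hrsp hcode hinv hs, hb.hand, hf, hi, hsd, hages⟩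

/-- The steady stack pointer as a word: `addr R = e.rsp − 1480`. -/
theorem rsp_word (g : Ghost) (h : 1480 ≤ g.RA) : addr g.R = g.e.reg .rsp - 1480 := by
  unfold Ghost.R steady
  rw [← addr_sub_lit _ _ h]
  unfold Ghost.RA
  rw [addr_toNat]

end Vorbis.Spec.start_decoder_C1

/-- Segment `C1` of `start_decoder` (`0x11428b … 0x114297`, line 3746: `mov eax, [rsp+24H] ; mov [rsp+30H], eax ; mov [rsp+18H], rbp`):
from the entry assertion `AtC1` (SD4 0, rbp = f) to `AtC2 0` at the head of the codebook loop. The walk is three instructions;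
the exit assertion is `exit_spills` (the invariant is carried over two spills into the function's own frame). -/
theorem Vorbis.Spec.Worked.start_decoder_C1_ok : Vorbis.Spec.start_decoder_C1.Statement := by
  intro Lay hLay μ hμ u₀ hcode g v hat
  obtain ⟨A, hb⟩ := hat
  -- 1. the ENTRY state's facts
  have hfr := hb.frame
  have he := hfr.entry
  v_entry he
  have hRA : 1480 ≤ g.RA := by
    unfold Ghost.RA
    unfold depth at he_room
    omega
  -- 2. the PRESENT state's facts
  have w_rip := hfr.rip
  have c_rsp : v.reg .rsp = g.e.reg .rsp - 1480 := by
    rw [hfr.rsp]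
    exact Vorbis.Spec.start_decoder_C1.rsp_word g hRA
  have c_rbp := hb.rbp
  have w_eq : Mem.EqOn L.textLo L.textHi u₀.mem v.mem := hfr.code
  have hdf : v.flags .df = false := (show abiInv _ from hfr.inv).1
  have hmx : v.mxcsr &&& 0x1F80 = 0x1F80 := (show abiInv _ from hfr.inv).2
  have hsse := Vorbis.sseOK_of_abiInv hfr.inv
  -- 3. the slot the segment loads: Z24, gcc's literal 0 in dword [R + 24H]
  have hz24 := hb.sd.frame.z24 (by omega) (by omega)
  have e24 : g.e.reg .rsp - 1444 = addr (g.R + 0x24) := by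
    apply eq_addr
    unfold Ghost.R Ghost.RA steady at *
    u_omega
  have r24 : v.mem.readLE (g.e.reg .rsp - 1444) 4 = 0 := by
    rw [e24]
    exact hz24
  -- 4. the walk: 0x11428b `mov eax, [rsp+24H]` ; 0x11428f `mov [rsp+30H], eax` ; 0x114293 `mov [rsp+18H], rbp` (line 3746)
  u_walk hcode [hμ.vendor] until [Vorbis.L.start_decoder.cut81] span [Vorbis.L.textLo, Vorbis.L.textHi] side (v_side)
  -- 5. the exit at the cut point 0x114298: `AtC2 0`
  refine ReachVia.done ?_
  have e30 : g.e.reg .rsp - 1432 = addr (g.R + 0x30) := by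
    apply eq_addr
    unfold Ghost.R Ghost.RA steady at *
    u_omega
  have e18 : g.e.reg .rsp - 1456 = addr (g.R + 0x18) := by
    apply eq_addr
    unfold Ghost.R Ghost.RA steady at *
    u_omega
  apply Vorbis.Spec.start_decoder_C1.exit_spills hb
  · -- rip = 0x114298
    exact w_rip
  · -- rsp was not written
    exact w_kept .rsp rfl
  · -- the image's text is unchanged
    exact w_eq
  · -- DF = 0, the MXCSR masks: no instruction of the segment writes flags or MXCSR
    v_inv
  · -- the memory: the two stores, their addresses as numbers (`rw` closes the goal: both sides are then the same term)
    rw [w_mem, e30, e18]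

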